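-- pv_equiv track=rewrite | github.com/rstms/cptree | cptree/exclude.py | glob_to_egrep
-- ===== SOURCE A (Python) =====
-- def glob_to_egrep(glob_pattern):
--     """
--     Convert a glob pattern to a regex pattern usable by egrep.
--
--     Args:
--     - glob_pattern (str): The glob pattern to convert.
--
--     Returns:
--     - str: A regex pattern equivalent to the input glob pattern.
--     """
--     # Escape special regex characters in glob pattern, except for * and ?
--     special_chars = "\\^$+{}[]|()."
--     for char in special_chars:
--         glob_pattern = glob_pattern.replace(char, "\\" + char)
--
--     # Convert glob wildcards to regex equivalents
--     glob_pattern = glob_pattern.replace("*", ".*")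
--     glob_pattern = glob_pattern.replace("?", ".")
--
--     # Anchor the pattern to match the whole string
--     regex_pattern = "^\\./" + glob_pattern + "$"
--
--     return regex_pattern
-- ===== SOURCE B (Python) =====
-- def glob_to_egrep(glob_pattern):
--     """Single-pass glob->egrep conversion: map each character once instead of
--     twelve sequential global .replace passes."""
--     out = []
--     for ch in glob_pattern:
--         if ch in "\\^$+{}[]|().":
--             out.append("\\" + ch)
--         elif ch == "*":
--             out.append(".*")
--         elif ch == "?":
--             out.append(".")
--         else:
--             out.append(ch)
--     return "^\\./" + "".join(out) + "$"
-- ===== Notes on version B (the rewrite author's own statement) =====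
-- stated objective: simpler
-- what changed: Replaces the twelve sequential whole-string .replace passes with a single per-character pass that appends each character's escaped/translated form to a list joined once.
import Mathlib
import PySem

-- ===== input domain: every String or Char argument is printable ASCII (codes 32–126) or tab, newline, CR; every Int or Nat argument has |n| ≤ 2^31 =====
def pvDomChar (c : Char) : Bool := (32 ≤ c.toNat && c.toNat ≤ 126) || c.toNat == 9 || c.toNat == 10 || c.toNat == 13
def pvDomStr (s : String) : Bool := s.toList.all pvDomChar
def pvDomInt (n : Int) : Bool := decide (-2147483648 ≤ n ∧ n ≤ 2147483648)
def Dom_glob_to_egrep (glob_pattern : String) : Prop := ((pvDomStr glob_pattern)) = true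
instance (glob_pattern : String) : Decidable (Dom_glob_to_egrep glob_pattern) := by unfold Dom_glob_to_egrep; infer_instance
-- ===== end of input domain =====

-- B replaces A's twelve sequential whole-string .replace passes with one per-character pass; objective: simpler.

-- ===== PORT A =====
-- A: escape each special char by a global replace pass, then translate * and ?, then anchor.
def glob_to_egrep (glob_pattern : String) : String :=
  String.ofList ("^\\./".toList ++
    PySem.Chars.replace
      (PySem.Chars.replace
        (("\\^$+{}[]|().".toList).foldl
          (fun s c => PySem.Chars.replace s [c] ['\\', c]) glob_pattern.toList)
        ['*'] ['.', '*'])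
      ['?'] ['.']
    ++ "$".toList)

-- ===== PORT B =====
-- B: one pass, mapping each character to its escaped/translated form.
def globCharMap (c : Char) : List Char :=
  if ("\\^$+{}[]|().".toList).contains c then ['\\', c]
  else if c = '*' then ['.', '*']
  else if c = '?' then ['.']
  else [c]

def glob_to_egrep_alt (glob_pattern : String) : String :=
  String.ofList ("^\\./".toList ++ glob_pattern.toList.flatMap globCharMap ++ "$".toList)

-- ===== PRECONDITION & SPEC =====
def Spec_glob_to_egrep (glob_pattern : String) (out : String) : Prop := out = glob_to_egrep_alt glob_pattern
instance (glob_pattern : String) (out : String) : Decidable (Spec_glob_to_egrep glob_pattern out) := by unfold Spec_glob_to_egrep; infer_instance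

-- ===== CLAIM (what is proved, stated in full; the proofs are below) =====
def Claim_equal_glob_to_egrep : Prop := ∀ (glob_pattern : String), Dom_glob_to_egrep glob_pattern → Spec_glob_to_egrep glob_pattern (glob_to_egrep glob_pattern)

-- ===== LEMMAS AND PROOFS =====

-- single-character replace is a flatMap over the characters
theorem replace_go_single (c : Char) (new : List Char) :
    ∀ (l acc : List Char),
      PySem.Chars.replace.go [c] new l.length l acc
        = acc.reverse ++ l.flatMap (fun x => if x = c then new else [x])
  | [], acc => by simp [PySem.Chars.replace.go]
  | x :: t, acc => by
    show PySem.Chars.replace.go [c] new (t.length + 1) (x :: t) acc = _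
    rw [PySem.Chars.replace.go]
    by_cases hx : x = c
    · subst hx
      simp only [List.isPrefixOf, BEq.rfl, Bool.true_and, if_true, List.length_cons,
        List.drop_succ_cons, List.length_nil, List.drop_zero]
      rw [replace_go_single]
      simp
    · have hbx : ([c].isPrefixOf (x :: t)) = false := by
        simp [List.isPrefixOf]
        exact fun h => hx h.symm
      simp only [hbx, Bool.false_eq_true, if_false]
      rw [replace_go_single]
      simp [hx]

theorem replace_single (l : List Char) (c : Char) (new : List Char) :
    PySem.Chars.replace l [c] new
      = l.flatMap (fun x => if x = c then new else [x]) := by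
  rw [PySem.Chars.replace]
  simp [replace_go_single]

set_option maxHeartbeats 1000000 in
theorem chain_eq_flatMap (l : List Char) :
    PySem.Chars.replace
      (PySem.Chars.replace
        (("\\^$+{}[]|().".toList).foldl
          (fun s c => PySem.Chars.replace s [c] ['\\', c]) l)
        ['*'] ['.', '*'])
      ['?'] ['.']
      = l.flatMap globCharMap := by
  simp only [show "\\^$+{}[]|().".toList
      = ['\\', '^', '$', '+', '{', '}', '[', ']', '|', '(', ')', '.'] from rfl,
    List.foldl_cons, List.foldl_nil, replace_single, List.flatMap_assoc]
  refine List.flatMap_congr (fun x _ => ?_)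
  by_cases h1 : x = '\\';   · subst h1; decide
  by_cases h2 : x = '^';    · subst h2; decide
  by_cases h3 : x = '$';    · subst h3; decide
  by_cases h4 : x = '+';    · subst h4; decide
  by_cases h5 : x = '{';    · subst h5; decide
  by_cases h6 : x = '}';    · subst h6; decide
  by_cases h7 : x = '[';    · subst h7; decide
  by_cases h8 : x = ']';    · subst h8; decide
  by_cases h9 : x = '|';    · subst h9; decide
  by_cases h10 : x = '(';   · subst h10; decide
  by_cases h11 : x = ')';   · subst h11; decide
  by_cases h12 : x = '.';   · subst h12; decide
  by_cases h13 : x = '*';   · subst h13; decide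
  by_cases h14 : x = '?';   · subst h14; decide
  simp [globCharMap, h1, h2, h3, h4, h5, h6, h7, h8, h9, h10, h11, h12, h13, h14]

-- ===== VERDICT (by name: the statement is the Claim_ definition above) =====
theorem glob_to_egrep_spec : Claim_equal_glob_to_egrep := by
  intro g _
  unfold Spec_glob_to_egrep glob_to_egrep glob_to_egrep_alt
  rw [chain_eq_flatMap]
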